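-- pv_equiv track=rewrite | github.com/chijunzheng/personal-assistant | eval/report.py | _render_tool_palette_delta
-- ===== SOURCE A (Python) =====
-- from typing import Any
--
-- def _render_tool_palette_delta(
--     default_rows: list[dict[str, Any]],
--     baseline_rows: list[dict[str, Any]],
-- ) -> str:
--     """Set difference of tools used per config (lifted from each row's ``tool_calls``)."""
--     def _tool_set(rows: list[dict[str, Any]]) -> set[str]:
--         used: set[str] = set()
--         for r in rows:
--             for t in r.get("tool_calls") or []:
--                 used.add(str(t))
--         return used
--
--     d_set = _tool_set(default_rows)
--     b_set = _tool_set(baseline_rows)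
--     common = d_set & b_set
--     only_default = d_set - b_set
--     only_baseline = b_set - d_set
--
--     out: list[str] = ["## Tool-palette delta", ""]
--     out.append("| group | tools |")
--     out.append("|---|---|")
--     out.append(f"| common | {', '.join(sorted(common)) or '—'} |")
--     out.append(f"| default only | {', '.join(sorted(only_default)) or '—'} |")
--     out.append(f"| baseline only | {', '.join(sorted(only_baseline)) or '—'} |")
--     out.append("")
--     return "\n".join(out)
-- ===== SOURCE B (Python) =====
-- from typing import Any
--
-- def _render_tool_palette_delta(
--     default_rows: list[dict[str, Any]],
--     baseline_rows: list[dict[str, Any]],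
-- ) -> str:
--     """Set difference of tools used per config (lifted from each row's ``tool_calls``)."""
--     seen: dict[str, tuple[bool, bool]] = {}
--     for r in default_rows:
--         for t in r.get("tool_calls") or []:
--             seen[str(t)] = (True, seen.get(str(t), (False, False))[1])
--     for r in baseline_rows:
--         for t in r.get("tool_calls") or []:
--             seen[str(t)] = (seen.get(str(t), (False, False))[0], True)
--
--     common: list[str] = []
--     only_default: list[str] = []
--     only_baseline: list[str] = []
--     for name in sorted(seen):
--         in_d, in_b = seen[name]
--         if in_d and in_b:
--             common.append(name)
--         elif in_d:
--             only_default.append(name)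
--         else:
--             only_baseline.append(name)
--
--     return "\n".join([
--         "## Tool-palette delta",
--         "",
--         "| group | tools |",
--         "|---|---|",
--         f"| common | {', '.join(common) or '—'} |",
--         f"| default only | {', '.join(only_default) or '—'} |",
--         f"| baseline only | {', '.join(only_baseline) or '—'} |",
--         "",
--     ])
-- ===== Notes on version B (the rewrite author's own statement) =====
-- stated objective: alternative
-- what changed: Replaces the two independently built sets plus three set operations (&, -, -) and three separate sorts with a single membership-flag dict built in one tagging pass, one sort of its keys, and one partition loop into the three groups.
import Mathlib
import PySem

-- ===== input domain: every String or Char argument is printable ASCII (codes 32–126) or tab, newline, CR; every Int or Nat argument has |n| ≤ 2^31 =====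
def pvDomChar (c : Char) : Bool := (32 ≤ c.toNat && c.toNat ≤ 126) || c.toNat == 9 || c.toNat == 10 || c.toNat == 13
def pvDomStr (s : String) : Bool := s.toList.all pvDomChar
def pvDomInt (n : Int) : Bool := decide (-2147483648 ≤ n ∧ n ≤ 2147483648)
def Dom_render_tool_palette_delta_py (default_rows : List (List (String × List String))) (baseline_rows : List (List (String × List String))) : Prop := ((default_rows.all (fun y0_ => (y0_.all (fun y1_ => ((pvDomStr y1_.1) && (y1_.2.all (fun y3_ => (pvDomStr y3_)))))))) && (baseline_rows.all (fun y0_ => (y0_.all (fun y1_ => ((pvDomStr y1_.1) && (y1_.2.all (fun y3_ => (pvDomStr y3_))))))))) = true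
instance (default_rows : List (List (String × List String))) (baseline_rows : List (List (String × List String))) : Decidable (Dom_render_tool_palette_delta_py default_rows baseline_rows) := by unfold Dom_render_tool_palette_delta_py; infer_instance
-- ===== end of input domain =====

-- B builds one membership-flag dict in a single tagging pass, sorts its keys once and
-- partitions them into the three groups, instead of A's two sets + three set ops + three sorts.

-- Python's `s or '—'` on a string (used identically by both sources in the f-strings)
def pyOrDash (s : String) : String := if s = "" then "—" else s

-- ===== PORT A =====
-- `r.get("tool_calls") or []`: a missing key gives None→[], and [] stays [] — getD is exact here
def pyToolSet (rows : List (List (String × List String))) : PySem.Set String :=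
  rows.foldl (fun used r =>
    ((PySem.Dict.mk r).getD "tool_calls" []).foldl (fun used t => PySem.Set.add used t) used)
    PySem.Set.empty

def render_tool_palette_delta_py (default_rows : List (List (String × List String))) (baseline_rows : List (List (String × List String))) : String :=
  let d_set := pyToolSet default_rows
  let b_set := pyToolSet baseline_rows
  let common := PySem.Set.inter d_set b_set
  let only_default := PySem.Set.diff d_set b_set
  let only_baseline := PySem.Set.diff b_set d_set
  let out := ["## Tool-palette delta", ""]
  let out := out ++ ["| group | tools |"]
  let out := out ++ ["|---|---|"]
  let out := out ++ ["| common | " ++ pyOrDash (PySem.Str.join ", " (PySem.List.sorted common (fun x => x) false)) ++ " |"]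
  let out := out ++ ["| default only | " ++ pyOrDash (PySem.Str.join ", " (PySem.List.sorted only_default (fun x => x) false)) ++ " |"]
  let out := out ++ ["| baseline only | " ++ pyOrDash (PySem.Str.join ", " (PySem.List.sorted only_baseline (fun x => x) false)) ++ " |"]
  let out := out ++ [""]
  PySem.Str.join "\n" out

-- ===== PORT B =====
def altTools (r : List (String × List String)) : List String :=
  (PySem.Dict.mk r).getD "tool_calls" []

-- `seen[str(t)] = (True, seen.get(str(t), (False, False))[1])` is exactly Dict.modify
def altMarkD (rows : List (List (String × List String))) (seen : PySem.Dict String (Bool × Bool)) : PySem.Dict String (Bool × Bool) :=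
  rows.foldl (fun seen r =>
    (altTools r).foldl (fun seen t => seen.modify t (false, false) (fun p => (true, p.2))) seen) seen

def altMarkB (rows : List (List (String × List String))) (seen : PySem.Dict String (Bool × Bool)) : PySem.Dict String (Bool × Bool) :=
  rows.foldl (fun seen r =>
    (altTools r).foldl (fun seen t => seen.modify t (false, false) (fun p => (p.1, true))) seen) seen

def render_tool_palette_delta_py_alt (default_rows : List (List (String × List String))) (baseline_rows : List (List (String × List String))) : String :=
  let seen := altMarkB baseline_rows (altMarkD default_rows PySem.Dict.empty)
  -- `seen[name]` (key always present) ported as getD with the same default the builder used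
  let groups := (PySem.List.sorted seen.keys (fun x => x) false).foldl
    (fun acc name =>
      let v := seen.getD name (false, false)
      if v.1 && v.2 then (acc.1 ++ [name], acc.2.1, acc.2.2)
      else if v.1 then (acc.1, acc.2.1 ++ [name], acc.2.2)
      else (acc.1, acc.2.1, acc.2.2 ++ [name])) (([] : List String), ([] : List String), ([] : List String))
  PySem.Str.join "\n"
    ["## Tool-palette delta", "",
     "| group | tools |",
     "|---|---|",
     "| common | " ++ pyOrDash (PySem.Str.join ", " groups.1) ++ " |",
     "| default only | " ++ pyOrDash (PySem.Str.join ", " groups.2.1) ++ " |",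
     "| baseline only | " ++ pyOrDash (PySem.Str.join ", " groups.2.2) ++ " |",
     ""]

-- ===== PRECONDITION & SPEC =====
def Spec_render_tool_palette_delta_py (default_rows : List (List (String × List String))) (baseline_rows : List (List (String × List String))) (out : String) : Prop := out = render_tool_palette_delta_py_alt default_rows baseline_rows
instance (default_rows : List (List (String × List String))) (baseline_rows : List (List (String × List String))) (out : String) : Decidable (Spec_render_tool_palette_delta_py default_rows baseline_rows out) := by unfold Spec_render_tool_palette_delta_py; infer_instance

-- ===== CLAIM (what is proved, stated in full; the proofs are below) =====
def Claim_equal_render_tool_palette_delta_py : Prop := ∀ (default_rows : List (List (String × List String))) (baseline_rows : List (List (String × List String))), Dom_render_tool_palette_delta_py default_rows baseline_rows → Spec_render_tool_palette_delta_py default_rows baseline_rows (render_tool_palette_delta_py default_rows baseline_rows)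

-- ===== LEMMAS AND PROOFS =====

theorem mem_pyToolSet_aux (rows : List (List (String × List String))) (s : PySem.Set String) (x : String) :
    x ∈ rows.foldl (fun used r =>
      ((PySem.Dict.mk r).getD "tool_calls" []).foldl (fun used t => PySem.Set.add used t) used) s
    ↔ x ∈ s ∨ ∃ r ∈ rows, x ∈ altTools r := by
  induction rows generalizing s with
  | nil => simp
  | cons r rs ih =>
    simp only [List.foldl_cons, ih, PySem.Set.mem_foldl_add _ (fun t => t), altTools]
    constructor
    · rintro ((h | ⟨t, ht, rfl⟩) | ⟨r', hr', h⟩)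
      · exact Or.inl h
      · exact Or.inr ⟨r, by simp, ht⟩
      · exact Or.inr ⟨r', by simp [hr'], h⟩
    · rintro (h | ⟨r', hr', h⟩)
      · exact Or.inl (Or.inl h)
      · rcases List.mem_cons.mp hr' with rfl | hr'
        · exact Or.inl (Or.inr ⟨x, h, rfl⟩)
        · exact Or.inr ⟨r', hr', h⟩

theorem mem_pyToolSet (rows : List (List (String × List String))) (x : String) :
    x ∈ pyToolSet rows ↔ ∃ r ∈ rows, x ∈ altTools r := by
  unfold pyToolSet
  rw [mem_pyToolSet_aux]
  simp [PySem.Set.empty]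

theorem nodup_foldl_add (ts : List String) (s : PySem.Set String) (hs : s.Nodup) :
    (ts.foldl (fun used t => PySem.Set.add used t) s).Nodup := by
  induction ts generalizing s with
  | nil => exact hs
  | cons t ts ih =>
    rw [List.foldl_cons]
    exact ih _ (PySem.Set.nodup_add _ _ hs)

theorem nodup_pyToolSet (rows : List (List (String × List String))) : (pyToolSet rows).Nodup := by
  unfold pyToolSet
  generalize hgen : (PySem.Set.empty : PySem.Set String) = s
  have hs : s.Nodup := by rw [← hgen]; exact List.nodup_nil
  clear hgen
  induction rows generalizing s with
  | nil => exact hs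
  | cons r rs ih =>
    rw [List.foldl_cons]
    exact ih _ (nodup_foldl_add _ _ hs)

theorem getD_markD_inner (ts : List String) (seen : PySem.Dict String (Bool × Bool)) (x : String) :
    (ts.foldl (fun seen t => seen.modify t (false, false) (fun p => (true, p.2))) seen).getD x (false, false)
    = ((seen.getD x (false, false)).1 || decide (x ∈ ts), (seen.getD x (false, false)).2) := by
  induction ts generalizing seen with
  | nil => simp
  | cons t ts ih =>
    simp only [List.foldl_cons, ih, PySem.Dict.getD_modify]
    by_cases h : x = t <;> simp [h]

theorem getD_markB_inner (ts : List String) (seen : PySem.Dict String (Bool × Bool)) (x : String) :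
    (ts.foldl (fun seen t => seen.modify t (false, false) (fun p => (p.1, true))) seen).getD x (false, false)
    = ((seen.getD x (false, false)).1, (seen.getD x (false, false)).2 || decide (x ∈ ts)) := by
  induction ts generalizing seen with
  | nil => simp
  | cons t ts ih =>
    simp only [List.foldl_cons, ih, PySem.Dict.getD_modify]
    by_cases h : x = t <;> simp [h]

theorem getD_markD (rows : List (List (String × List String))) (seen : PySem.Dict String (Bool × Bool)) (x : String) :
    (altMarkD rows seen).getD x (false, false)
    = ((seen.getD x (false, false)).1 || decide (∃ r ∈ rows, x ∈ altTools r), (seen.getD x (false, false)).2) := by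
  induction rows generalizing seen with
  | nil => simp [altMarkD]
  | cons r rs ih =>
    simp only [altMarkD, List.foldl_cons] at ih ⊢
    rw [ih, getD_markD_inner]
    by_cases h : x ∈ altTools r <;> simp [h]

theorem getD_markB (rows : List (List (String × List String))) (seen : PySem.Dict String (Bool × Bool)) (x : String) :
    (altMarkB rows seen).getD x (false, false)
    = ((seen.getD x (false, false)).1, (seen.getD x (false, false)).2 || decide (∃ r ∈ rows, x ∈ altTools r)) := by
  induction rows generalizing seen with
  | nil => simp [altMarkB]
  | cons r rs ih =>
    simp only [altMarkB, List.foldl_cons] at ih ⊢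
    rw [ih, getD_markB_inner]
    by_cases h : x ∈ altTools r <;> simp [h]

theorem contains_mark_inner (f : Bool × Bool → Bool × Bool) (ts : List String)
    (seen : PySem.Dict String (Bool × Bool)) (x : String) :
    (ts.foldl (fun seen t => seen.modify t (false, false) f) seen).contains x
    = (decide (x ∈ ts) || seen.contains x) := by
  induction ts generalizing seen with
  | nil => simp
  | cons t ts ih =>
    simp only [List.foldl_cons, ih, PySem.Dict.contains_modify]
    by_cases h : x = t
    · simp [h]
    · have hb : (x == t) = false := by simp [h]
      simp [h, hb]

theorem contains_mark (f : Bool × Bool → Bool × Bool) (rows : List (List (String × List String)))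
    (seen : PySem.Dict String (Bool × Bool)) (x : String) :
    (rows.foldl (fun seen r =>
      (altTools r).foldl (fun seen t => seen.modify t (false, false) f) seen) seen).contains x = true
    ↔ (∃ r ∈ rows, x ∈ altTools r) ∨ seen.contains x = true := by
  induction rows generalizing seen with
  | nil => simp
  | cons r rs ih =>
    rw [List.foldl_cons, ih, contains_mark_inner]
    simp only [Bool.or_eq_true, decide_eq_true_eq]
    constructor
    · rintro (⟨r', hr', hx⟩ | (hx | hc))
      · exact Or.inl ⟨r', List.mem_cons_of_mem _ hr', hx⟩
      · exact Or.inl ⟨r, List.mem_cons_self, hx⟩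
      · exact Or.inr hc
    · rintro (⟨r', hr', hx⟩ | hc)
      · rcases List.mem_cons.mp hr' with rfl | hr'
        · exact Or.inr (Or.inl hx)
        · exact Or.inl ⟨r', hr', hx⟩
      · exact Or.inr (Or.inr hc)

theorem nodup_keys_mark_inner (f : Bool × Bool → Bool × Bool) (ts : List String)
    (seen : PySem.Dict String (Bool × Bool)) (hs : seen.keys.Nodup) :
    (ts.foldl (fun seen t => seen.modify t (false, false) f) seen).keys.Nodup := by
  induction ts generalizing seen with
  | nil => exact hs
  | cons t ts ih =>
    rw [List.foldl_cons]
    refine ih _ ?_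
    rw [PySem.Dict.keys_modify]
    exact PySem.Dict.nodup_keys_insert _ _ _ hs

theorem nodup_keys_mark (f : Bool × Bool → Bool × Bool) (rows : List (List (String × List String)))
    (seen : PySem.Dict String (Bool × Bool)) (hs : seen.keys.Nodup) :
    (rows.foldl (fun seen r =>
      (altTools r).foldl (fun seen t => seen.modify t (false, false) f) seen) seen).keys.Nodup := by
  induction rows generalizing seen with
  | nil => exact hs
  | cons r rs ih =>
    rw [List.foldl_cons]
    exact ih _ (nodup_keys_mark_inner f _ _ hs)

theorem seen_getD (d b : List (List (String × List String))) (x : String) :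
    (altMarkB b (altMarkD d PySem.Dict.empty)).getD x (false, false)
    = (decide (∃ r ∈ d, x ∈ altTools r), decide (∃ r ∈ b, x ∈ altTools r)) := by
  rw [getD_markB, getD_markD]
  simp

theorem mem_keys_seen (d b : List (List (String × List String))) (x : String) :
    x ∈ (altMarkB b (altMarkD d PySem.Dict.empty)).keys
    ↔ (∃ r ∈ d, x ∈ altTools r) ∨ (∃ r ∈ b, x ∈ altTools r) := by
  rw [← PySem.Dict.contains_iff_mem_keys]
  unfold altMarkB altMarkD
  rw [contains_mark, contains_mark]
  simp [or_comm]

theorem nodup_keys_seen (d b : List (List (String × List String))) :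
    (altMarkB b (altMarkD d PySem.Dict.empty)).keys.Nodup := by
  unfold altMarkB altMarkD
  refine nodup_keys_mark _ _ _ (nodup_keys_mark _ _ _ ?_)
  simp [PySem.Dict.empty, PySem.Dict.keys]

theorem names_pairwise_lt (d b : List (List (String × List String))) :
    (PySem.List.sorted (altMarkB b (altMarkD d PySem.Dict.empty)).keys (fun x => x) false).Pairwise (· < ·) := by
  have hle := PySem.List.sorted_pairwise (altMarkB b (altMarkD d PySem.Dict.empty)).keys (fun x => x)
  have hnd : (PySem.List.sorted (altMarkB b (altMarkD d PySem.Dict.empty)).keys (fun x => x) false).Nodup :=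
    ((PySem.List.sorted_perm _ _ _).nodup_iff).mpr (nodup_keys_seen d b)
  exact (hle.and hnd).imp (fun h => lt_of_le_of_ne h.1 h.2)

theorem names_nodup (d b : List (List (String × List String))) :
    (PySem.List.sorted (altMarkB b (altMarkD d PySem.Dict.empty)).keys (fun x => x) false).Nodup :=
  ((PySem.List.sorted_perm _ _ _).nodup_iff).mpr (nodup_keys_seen d b)

theorem mem_names (d b : List (List (String × List String))) (x : String) :
    x ∈ PySem.List.sorted (altMarkB b (altMarkD d PySem.Dict.empty)).keys (fun x => x) false
    ↔ (∃ r ∈ d, x ∈ altTools r) ∨ (∃ r ∈ b, x ∈ altTools r) := by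
  rw [PySem.List.mem_sorted, mem_keys_seen]

theorem group_eq (d b : List (List (String × List String))) (S : PySem.Set String)
    (p : String → Bool) (hS : S.Nodup)
    (hmem : ∀ x, x ∈ S ↔
      x ∈ PySem.List.sorted (altMarkB b (altMarkD d PySem.Dict.empty)).keys (fun x => x) false ∧ p x = true) :
    PySem.List.sorted S (fun x => x) false
    = (PySem.List.sorted (altMarkB b (altMarkD d PySem.Dict.empty)).keys (fun x => x) false).filter p := by
  apply PySem.List.sorted_eq_of_perm_of_pairwise_lt
  · refine (List.perm_ext_iff_of_nodup ((names_nodup d b).filter p) hS).mpr ?_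
    intro a
    rw [List.mem_filter, hmem]
  · exact (names_pairwise_lt d b).filter p

theorem group_common (d b : List (List (String × List String))) :
    PySem.List.sorted (PySem.Set.inter (pyToolSet d) (pyToolSet b)) (fun x => x) false
    = (PySem.List.sorted (altMarkB b (altMarkD d PySem.Dict.empty)).keys (fun x => x) false).filter
        (fun n => ((altMarkB b (altMarkD d PySem.Dict.empty)).getD n (false, false)).1 &&
                  ((altMarkB b (altMarkD d PySem.Dict.empty)).getD n (false, false)).2) := by
  refine group_eq d b _ _ (PySem.Set.nodup_inter _ _ (nodup_pyToolSet d)) ?_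
  intro x
  rw [PySem.Set.mem_inter, mem_names, mem_pyToolSet, mem_pyToolSet, seen_getD]
  simp only [Bool.and_eq_true, decide_eq_true_eq]
  tauto

theorem group_only_default (d b : List (List (String × List String))) :
    PySem.List.sorted (PySem.Set.diff (pyToolSet d) (pyToolSet b)) (fun x => x) false
    = (PySem.List.sorted (altMarkB b (altMarkD d PySem.Dict.empty)).keys (fun x => x) false).filter
        (fun n => ((altMarkB b (altMarkD d PySem.Dict.empty)).getD n (false, false)).1 &&
                  !((altMarkB b (altMarkD d PySem.Dict.empty)).getD n (false, false)).2) := by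
  refine group_eq d b _ _ (PySem.Set.nodup_diff _ _ (nodup_pyToolSet d)) ?_
  intro x
  rw [PySem.Set.mem_diff, mem_names, mem_pyToolSet, mem_pyToolSet, seen_getD]
  simp only [Bool.and_eq_true, Bool.not_eq_eq_eq_not, Bool.not_true, decide_eq_true_eq,
    decide_eq_false_iff_not]
  generalize (∃ r ∈ d, x ∈ altTools r) = P
  generalize (∃ r ∈ b, x ∈ altTools r) = Q
  tauto

theorem group_only_baseline (d b : List (List (String × List String))) :
    PySem.List.sorted (PySem.Set.diff (pyToolSet b) (pyToolSet d)) (fun x => x) false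
    = (PySem.List.sorted (altMarkB b (altMarkD d PySem.Dict.empty)).keys (fun x => x) false).filter
        (fun n => !((altMarkB b (altMarkD d PySem.Dict.empty)).getD n (false, false)).1) := by
  refine group_eq d b _ _ (PySem.Set.nodup_diff _ _ (nodup_pyToolSet b)) ?_
  intro x
  rw [PySem.Set.mem_diff, mem_names, mem_pyToolSet, mem_pyToolSet, seen_getD]
  simp only [Bool.not_eq_eq_eq_not, Bool.not_true, decide_eq_false_iff_not]
  generalize (∃ r ∈ d, x ∈ altTools r) = P
  generalize (∃ r ∈ b, x ∈ altTools r) = Q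
  tauto

theorem foldl_classify (g : String → Bool × Bool) (names : List String) (a b c : List String) :
    names.foldl (fun acc name =>
      if (g name).1 && (g name).2 then (acc.1 ++ [name], acc.2.1, acc.2.2)
      else if (g name).1 then (acc.1, acc.2.1 ++ [name], acc.2.2)
      else (acc.1, acc.2.1, acc.2.2 ++ [name])) (a, b, c)
    = (a ++ names.filter (fun n => (g n).1 && (g n).2),
       b ++ names.filter (fun n => (g n).1 && !(g n).2),
       c ++ names.filter (fun n => !(g n).1)) := by
  induction names generalizing a b c with
  | nil => simp
  | cons n ns ih =>
    rw [List.foldl_cons]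
    by_cases h1 : (g n).1 <;> by_cases h2 : (g n).2
    · rw [if_pos (by simp [h1, h2])]
      rw [ih]
      simp [h1, h2]
    · rw [if_neg (by simp [h2]), if_pos h1, ih]
      simp [h1, h2]
    · rw [if_neg (by simp [h1]), if_neg (by simp [h1]), ih]
      simp [h1, h2]
    · rw [if_neg (by simp [h1]), if_neg (by simp [h1]), ih]
      simp [h1, h2]

-- ===== VERDICT (by name: the statement is the Claim_ definition above) =====
theorem render_tool_palette_delta_py_spec : Claim_equal_render_tool_palette_delta_py := by
  intro d b _
  show render_tool_palette_delta_py d b = render_tool_palette_delta_py_alt d b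
  simp only [render_tool_palette_delta_py, render_tool_palette_delta_py_alt]
  rw [foldl_classify (fun n => (altMarkB b (altMarkD d PySem.Dict.empty)).getD n (false, false))]
  simp only [List.nil_append]
  rw [← group_common, ← group_only_default, ← group_only_baseline]
  rfl
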